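-- pv_equiv track=rewrite | github.com/starboarder2001/outbit | lib/outbit/cli/cli.py | get_action_from_command
-- ===== SOURCE A (Python) =====
-- def get_action_from_command(line):
--     action_list = line.strip().split()
--     actionjson = {'category': "/", "action": "", "options": ""}
--     if len(action_list) == 1:
--         actionjson = {'category': "/", "action": action_list[0], "options": ""}
--     elif len(action_list) >= 2:
--         category = "/"
--         action = ""
--         options = ""
--         count = 0 # Count number of options
--         action_list_reverse = list(action_list)
--         action_list_reverse.reverse()
--         for node in action_list_reverse:
--             if category is "/" and action is "" and "=" in node:
--                 options += "%s," % node
--                 count += 1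
--             elif category is "/" and action is "" and "=" not in node:
--                 action = node
--                 count += 1
--             else:
--                 category_range = len(action_list) - count
--                 category = "/%s" % "/".join(action_list[0:category_range])
--         actionjson = {'category': category, "action": action, "options": options}
--
--     return actionjson
-- ===== SOURCE B (Python) =====
-- def get_action_from_command(line):
--     tokens = line.strip().split()
--     if len(tokens) == 1:
--         return {'category': "/", "action": tokens[0], "options": ""}
--     if len(tokens) < 2:
--         return {'category': "/", "action": "", "options": ""}
--     # count trailing option tokens (those containing '=')
--     k = 0
--     for t in reversed(tokens):
--         if "=" in t:
--             k += 1
--         else: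
--             break
--     i = len(tokens) - 1 - k          # index of the action token, -1 if none
--     options = "".join(t + "," for t in reversed(tokens[i + 1:]))
--     action = tokens[i] if i >= 0 else ""
--     category = "/" + "/".join(tokens[:i]) if i >= 1 else "/"
--     return {'category': category, "action": action, "options": options}
-- ===== Notes on version B (the rewrite author's own statement) =====
-- stated objective: simpler
-- what changed: A reverse-copies the token list and folds a four-field category/action/options/count state, recomputing category on every leftover token; B counts the trailing option tokens (those containing an equals sign) once, then reads action, category and options directly off the token indices with slices and joins.
import Mathlib
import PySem

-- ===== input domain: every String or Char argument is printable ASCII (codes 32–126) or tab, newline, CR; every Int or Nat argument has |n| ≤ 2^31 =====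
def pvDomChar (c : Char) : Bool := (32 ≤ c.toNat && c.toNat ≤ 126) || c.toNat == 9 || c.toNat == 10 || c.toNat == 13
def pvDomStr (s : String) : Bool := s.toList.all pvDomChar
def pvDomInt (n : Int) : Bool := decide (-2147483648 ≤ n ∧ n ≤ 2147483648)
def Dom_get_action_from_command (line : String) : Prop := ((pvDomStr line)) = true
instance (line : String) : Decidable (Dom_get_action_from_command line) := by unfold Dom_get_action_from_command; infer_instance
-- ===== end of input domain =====

-- B is a simpler decomposition: instead of A's reverse-copied list, a four-field loop state and a
-- re-computed category on every leftover token, B counts the trailing option tokens (those containing an equals sign) once and reads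
-- action/category/options directly off the token indices with slices and joins. Same return value.

-- ===== PORT A =====
-- A's Python compares 'category is "/"' / 'action is ""' on interned literal strings; for the
-- values reaching those tests identity coincides with equality, ported as ==.
def pvStepA (action_list : List String) (s : String × String × String × Int) (node : String) :
    String × String × String × Int :=
  match s with
  | (category, action, options, count) =>
    if category == "/" && action == "" && PySem.Str.isIn "=" node then
      (category, action, options ++ node ++ ",", count + 1)
    else if category == "/" && action == "" && !(PySem.Str.isIn "=" node) then
      (category, node, options, count + 1)
    else
      ("/" ++ PySem.Str.join "/"
          (PySem.List.slice action_list (some 0) (some ((action_list.length : Int) - count))),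
        action, options, count)

def get_action_from_command (line : String) : List (String × String) :=
  let action_list := PySem.Str.split₀ (PySem.Str.strip line)
  if action_list.length == 1 then
    [("category", "/"), ("action", (PySem.List.pyGet? action_list 0).getD ""), ("options", "")]
  else if 2 ≤ action_list.length then
    let action_list_reverse := action_list.reverse
    let st := action_list_reverse.foldl (pvStepA action_list) ("/", "", "", 0)
    [("category", st.1), ("action", st.2.1), ("options", st.2.2.1)]
  else
    [("category", "/"), ("action", ""), ("options", "")]

-- ===== PORT B =====
-- Source B's 'for t in reversed(tokens): … else break' counting loop
def pvTrailingOpts : List String → Nat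
  | [] => 0
  | t :: rest => if PySem.Str.isIn "=" t then pvTrailingOpts rest + 1 else 0

def get_action_from_command_alt (line : String) : List (String × String) :=
  let tokens := PySem.Str.split₀ (PySem.Str.strip line)
  if tokens.length == 1 then
    [("category", "/"), ("action", (PySem.List.pyGet? tokens 0).getD ""), ("options", "")]
  else if tokens.length < 2 then
    [("category", "/"), ("action", ""), ("options", "")]
  else
    let k := pvTrailingOpts tokens.reverse
    let i : Int := (tokens.length : Int) - 1 - (k : Int)
    let options := PySem.Str.join ""
      ((PySem.List.slice tokens (some (i + 1)) none).reverse.map (fun t => t ++ ","))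
    let action := if 0 ≤ i then (PySem.List.pyGet? tokens i).getD "" else ""
    let category :=
      if 1 ≤ i then "/" ++ PySem.Str.join "/" (PySem.List.slice tokens none (some i)) else "/"
    [("category", category), ("action", action), ("options", options)]

-- ===== PRECONDITION & SPEC =====
def Spec_get_action_from_command (line : String) (out : List (String × String)) : Prop := out = get_action_from_command_alt line
instance (line : String) (out : List (String × String)) : Decidable (Spec_get_action_from_command line out) := by unfold Spec_get_action_from_command; infer_instance

-- ===== CLAIM (what is proved, stated in full; the proofs are below) =====
def Claim_equal_get_action_from_command : Prop := ∀ (line : String), Dom_get_action_from_command line → Spec_get_action_from_command line (get_action_from_command line)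

-- ===== LEMMAS AND PROOFS =====

theorem pv_flat_intersperse_nil (xs : List (List Char)) :
    (List.intersperse ([] : List Char) xs).flatten = xs.flatten := by
  induction xs with
  | nil => rfl
  | cons a t ih =>
    cases t with
    | nil => rfl
    | cons b t' => simp_all [List.intersperse]

theorem pv_join_empty_cons (a : String) (l : List String) :
    PySem.Str.join "" (a :: l) = a ++ PySem.Str.join "" l := by
  simp [PySem.Str.join, PySem.Chars.join, List.intercalate, pv_flat_intersperse_nil,
    String.ofList_append]

theorem pv_go_ne_nil (s : List Char) : ∀ (cur : List Char) (acc : List (List Char)),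
    (∀ u ∈ acc, u ≠ []) → ∀ t ∈ PySem.Chars.split₀.go s cur acc, t ≠ [] := by
  induction s with
  | nil =>
    intro cur acc hacc t ht
    unfold PySem.Chars.split₀.go at ht
    by_cases h : cur.isEmpty
    · simp [h] at ht; exact hacc t (by simpa using ht)
    · simp [h] at ht
      rcases ht with h2 | h2
      · exact hacc t h2
      · subst h2; simpa [List.isEmpty_iff] using h
  | cons c rest ih =>
    intro cur acc hacc t ht
    unfold PySem.Chars.split₀.go at ht
    by_cases hs : PySem.Chars.isspace c
    · by_cases h : cur.isEmpty
      · simp [hs, h] at ht; exact ih [] acc hacc t ht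
      · simp [hs, h] at ht
        refine ih [] (cur.reverse :: acc) ?_ t ht
        intro u hu
        rcases List.mem_cons.mp hu with h2 | h2
        · subst h2; simpa [List.isEmpty_iff] using h
        · exact hacc u h2
    · simp [hs] at ht; exact ih (c :: cur) acc hacc t ht

theorem pv_split₀_ne_nil (s : String) : ∀ t ∈ PySem.Str.split₀ s, t ≠ "" := by
  intro t ht
  simp [PySem.Str.split₀, PySem.Chars.split₀] at ht
  obtain ⟨u, hu, rfl⟩ := ht
  have hu' := pv_go_ne_nil s.toList [] [] (by simp) u hu
  intro h
  exact hu' (by have := congrArg String.toList h; simpa using this)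

-- Phase 1 of A's loop: while category = "/" and action = "", every '='-token is appended to options.
theorem pv_phase1 (ts : List String) (opts : List String) (o0 : String) (c0 : Int)
    (h : ∀ t ∈ opts, PySem.Str.isIn "=" t = true) :
    opts.foldl (pvStepA ts) ("/", "", o0, c0) =
      ("/", "", o0 ++ PySem.Str.join "" (opts.map (fun t => t ++ ",")), c0 + opts.length) := by
  induction opts generalizing o0 c0 with
  | nil => simp [PySem.Str.join, PySem.Chars.join, List.intercalate]
  | cons a rest ih =>
    have ha : PySem.Str.isIn "=" a = true := h a (by simp)
    simp only [List.foldl_cons, pvStepA, ha]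
    rw [if_pos (by decide)]
    rw [ih (o0 ++ a ++ ",") (c0 + 1) (fun t ht => h t (by simp [ht]))]
    simp only [Prod.mk.injEq]
    refine ⟨trivial, trivial, ?_, by simp only [List.length_cons]; push_cast; ring⟩
    rw [List.map_cons, pv_join_empty_cons]
    simp [String.append_assoc]

-- Phase 3 of A's loop: once action is set, every remaining token recomputes category with count frozen.
theorem pv_phase3 (ts : List String) (l : List String) (c a o : String) (cnt : Int)
    (hane : a ≠ "") :
    l.foldl (pvStepA ts) (c, a, o, cnt) =
      ((if l.isEmpty then c
        else "/" ++ PySem.Str.join "/"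
          (PySem.List.slice ts (some 0) (some ((ts.length : Int) - cnt)))), a, o, cnt) := by
  induction l generalizing c with
  | nil => simp
  | cons x l' ih =>
    have ha : (a == "") = false := beq_eq_false_iff_ne.mpr hane
    simp only [List.foldl_cons, pvStepA, ha, Bool.false_and, Bool.and_false, if_false,
      Bool.false_eq_true]
    rw [ih]
    by_cases h : l'.isEmpty <;> simp [h]

theorem pv_trailing_all (l : List String) (h : ∀ t ∈ l, PySem.Str.isIn "=" t = true) :
    pvTrailingOpts l = l.length := by
  induction l with
  | nil => rfl
  | cons a rest ih =>
    have ha := h a (by simp)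
    simp only [PySem.Str.isIn, show "=".toList = ['='] from rfl] at ha
    simp [pvTrailingOpts, PySem.Str.isIn, ha, ih (fun t ht => h t (by simp [ht]))]

theorem pv_trailing_split (opts : List String) (a : String) (rest : List String)
    (h : ∀ t ∈ opts, PySem.Str.isIn "=" t = true) (ha : PySem.Str.isIn "=" a = false) :
    pvTrailingOpts (opts ++ a :: rest) = opts.length := by
  induction opts with
  | nil =>
    have ha' := ha
    simp only [PySem.Str.isIn, show "=".toList = ['='] from rfl] at ha'
    simp [pvTrailingOpts, PySem.Str.isIn, ha']
  | cons x xs ih =>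
    have hx := h x (by simp)
    simp only [PySem.Str.isIn, show "=".toList = ['='] from rfl] at hx
    simp [pvTrailingOpts, PySem.Str.isIn, hx, ih (fun t ht => h t (by simp [ht]))]

-- every list splits, from the left, into a run satisfying P and a first failure (or is all-P)
theorem pv_decomp (P : String → Bool) (r : List String) :
    (∀ x ∈ r, P x = true) ∨
      ∃ q' a p', r = q' ++ a :: p' ∧ (∀ x ∈ q', P x = true) ∧ P a = false := by
  induction r with
  | nil => exact Or.inl (by simp)
  | cons x xs ih =>
    by_cases hx : P x = true
    · rcases ih with hall | ⟨q', a, p', hr, hq, hpa⟩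
      · refine Or.inl ?_
        intro y hy
        rcases List.mem_cons.mp hy with h | h
        · subst h; exact hx
        · exact hall y h
      · refine Or.inr ⟨x :: q', a, p', by simp [hr], ?_, hpa⟩
        intro y hy
        rcases List.mem_cons.mp hy with h | h
        · subst h; exact hx
        · exact hq y h
    · exact Or.inr ⟨[], x, xs, by simp, by simp, by simpa using hx⟩

-- ===== VERDICT (by name: the statement is the Claim_ definition above) =====
theorem get_action_from_command_spec : Claim_equal_get_action_from_command := by
  intro line _
  unfold Spec_get_action_from_command get_action_from_command get_action_from_command_alt
  have hne := pv_split₀_ne_nil (PySem.Str.strip line)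
  generalize PySem.Str.split₀ (PySem.Str.strip line) = ts at hne ⊢
  match ts with
  | [] => rfl
  | [t] => rfl
  | t0 :: t1 :: rest =>
    rcases pv_decomp (fun t => PySem.Str.isIn "=" t) ((t0 :: t1 :: rest).reverse) with hall | ⟨q', a, p', hr, hq, hpa⟩
    · have hlen : pvTrailingOpts (t0 :: t1 :: rest).reverse = (t0 :: t1 :: rest).reverse.length :=
        pv_trailing_all _ hall
      have hfold := pv_phase1 (t0 :: t1 :: rest) ((t0 :: t1 :: rest).reverse) "" 0 hall
      simp only [hfold, hlen, List.length_reverse]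
      rw [show ((t0 :: t1 :: rest).length : Int) - 1 - ((t0 :: t1 :: rest).length : Int) = -1 from by ring]
      norm_num [PySem.List.slice_none_none, String.empty_append]
    · have hpa' : PySem.Str.isIn "=" a = false := hpa
      have hts : t0 :: t1 :: rest = p'.reverse ++ a :: q'.reverse := by
        have h2 := congrArg List.reverse hr
        simpa using h2
      have hane : a ≠ "" := hne a (by rw [hts]; simp)
      have hq'' : ∀ x ∈ q', PySem.Str.isIn "=" x = true := hq
      have hlen : pvTrailingOpts (t0 :: t1 :: rest).reverse = q'.length := by
        rw [hr]; exact pv_trailing_split q' a p' hq'' hpa'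
      have hn : (t0 :: t1 :: rest).length = p'.length + 1 + q'.length := by
        rw [hts]; simp; omega
      have hstep : pvStepA (t0 :: t1 :: rest) ("/", "", "" ++ PySem.Str.join "" (List.map (fun t => t ++ ",") q'), 0 + (q'.length : Int)) a =
          ("/", a, "" ++ PySem.Str.join "" (List.map (fun t => t ++ ",") q'), 0 + (q'.length : Int) + 1) := by
        have hpa2 : PySem.Chars.isIn ['='] a.toList = false := by
          simpa only [PySem.Str.isIn, show "=".toList = ['='] from rfl] using hpa'
        simp [pvStepA, PySem.Str.isIn, hpa2]
      have hfold : List.foldl (pvStepA (t0 :: t1 :: rest)) ("/", "", "", 0) (t0 :: t1 :: rest).reverse =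
          ((if p'.isEmpty then "/"
            else "/" ++ PySem.Str.join "/"
              (PySem.List.slice (t0 :: t1 :: rest) (some 0)
                (some (((t0 :: t1 :: rest).length : Int) - (0 + (q'.length : Int) + 1))))),
            a, "" ++ PySem.Str.join "" (List.map (fun t => t ++ ",") q'), 0 + (q'.length : Int) + 1) := by
        rw [hr, List.foldl_append, pv_phase1 _ q' "" 0 hq'', List.foldl_cons, hstep,
          pv_phase3 _ p' _ a _ _ hane]
      simp only [hfold, hlen]
      have hi : ((t0 :: t1 :: rest).length : Int) - 1 - (q'.length : Int) = ((p'.length : Nat) : Int) := by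
        rw [hn]; push_cast; ring
      have hib : ((t0 :: t1 :: rest).length : Int) - (0 + (q'.length : Int) + 1) = ((p'.length : Nat) : Int) := by
        rw [hn]; push_cast; ring
      rw [hi, hib]
      have hget : PySem.List.pyGet? (t0 :: t1 :: rest) ((p'.length : Nat) : Int) = some a := by
        rw [PySem.List.pyGet?_natCast, hts]
        rw [List.getElem?_append_right (by simp)]
        simp
      have hsl : PySem.List.slice (t0 :: t1 :: rest) (some ((p'.length : Int) + 1)) none = q'.reverse := by
        rw [show ((p'.length : Int) + 1) = ((p'.length + 1 : Nat) : Int) from by push_cast; ring,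
          PySem.List.slice_from_natCast, hts,
          show p'.reverse ++ a :: q'.reverse = (p'.reverse ++ [a]) ++ q'.reverse from by simp]
        rw [show p'.length + 1 = (p'.reverse ++ [a]).length from by simp]
        exact List.drop_left
      rw [hsl, hget]
      cases p' with
      | nil => simp
      | cons x p'' =>
        simp [String.empty_append]
        intro h2
        omega
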